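-- pv_equiv track=rewrite | github.com/iechevarria/CSCI-320 | FederationFavorites.py | perfectString
-- ===== SOURCE A (Python) =====
-- def perfectString(k):
--     arr = []
--     for i in range(1, k):
--         if k % i == 0:
--             arr.append(i)
--     to_return = str(k)
--     if sum(arr) == k:
--         to_return += ' ='
--         for i in range(len(arr) - 1):
--             to_return += ' ' + str(arr[i]) + ' +'
--         to_return += ' ' + str(arr[len(arr) - 1])
--     else:
--         to_return += ' is NOT perfect.'
--     return to_return
-- ===== SOURCE B (Python) =====
-- def perfectString(k):
--     # Enumerate divisors only up to sqrt(k), pairing each small divisor i with k // i.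
--     small, large = [], []
--     i = 1
--     while i * i <= k:
--         if k % i == 0:
--             if i != k:
--                 small.append(i)
--             j = k // i
--             if j != i and j != k:
--                 large.append(j)
--         i += 1
--     divisors = small + large[::-1]
--     if sum(divisors) == k and divisors:
--         return str(k) + ' = ' + ' + '.join(str(d) for d in divisors)
--     return str(k) + ' is NOT perfect.'
-- ===== Notes on version B (the rewrite author's own statement) =====
-- stated objective: faster
-- what changed: B enumerates divisors only up to sqrt(k), collecting each small divisor i together with its cofactor k//i and concatenating small + reversed large, instead of A's scan of every i in 1..k-1, and formats the sum with ' + '.join instead of an index loop.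
-- outside the precondition, e.g. on perfectString(0): A raises IndexError, B returns '0 is NOT perfect.'
import Mathlib
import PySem

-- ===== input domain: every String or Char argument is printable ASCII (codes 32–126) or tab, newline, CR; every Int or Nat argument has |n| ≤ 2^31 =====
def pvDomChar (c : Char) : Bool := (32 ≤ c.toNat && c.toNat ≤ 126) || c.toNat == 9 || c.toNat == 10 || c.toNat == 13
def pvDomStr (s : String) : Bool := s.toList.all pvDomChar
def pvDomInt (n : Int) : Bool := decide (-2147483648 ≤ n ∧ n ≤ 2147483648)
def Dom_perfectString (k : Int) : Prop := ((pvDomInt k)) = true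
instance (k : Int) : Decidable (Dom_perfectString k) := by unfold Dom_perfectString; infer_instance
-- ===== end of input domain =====

-- B enumerates divisors only up to sqrt(k) in cofactor pairs instead of A's scan of all of 1..k-1, and formats with a join; return values agree on every k ≠ 0.

-- ===== PORT A =====
def perfectString (k : Int) : String :=
  let arr := (PySem.List.pyRange 1 k 1).foldl
      (fun arr i => if PySem.Int.mod k i == 0 then arr ++ [i] else arr) []
  let toReturn := PySem.Int.toStr k
  if arr.sum == k then
    let t := toReturn ++ " ="
    let t := (PySem.List.pyRange 0 ((arr.length : Int) - 1) 1).foldl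
        (fun t i => t ++ " " ++ PySem.Int.toStr (PySem.List.pyGetD arr i 0) ++ " +") t
    -- arr[len(arr)-1]: only reachable out of range at k = 0 (empty arr, IndexError), which Pre_ excludes
    t ++ " " ++ PySem.Int.toStr (PySem.List.pyGetD arr ((arr.length : Int) - 1) 0)
  else
    toReturn ++ " is NOT perfect."

-- ===== PORT B =====
-- the while loop of Source B; hi is only the termination invariant (i starts at 1 and increases)
def pvLoopB (k i : Int) (small large : List Int) (hi : 1 ≤ i) : List Int × List Int :=
  if h : i * i ≤ k then
    if PySem.Int.mod k i == 0 then
      let small := if i ≠ k then small ++ [i] else small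
      let j := PySem.Int.floordiv k i
      let large := if j ≠ i ∧ j ≠ k then large ++ [j] else large
      pvLoopB k (i + 1) small large (by omega)
    else
      pvLoopB k (i + 1) small large (by omega)
  else
    (small, large)
termination_by (k + 1 - i).toNat
decreasing_by
  all_goals
    have hik : i ≤ k := le_trans (le_mul_of_one_le_left (by omega) hi) h
    omega

def perfectString_alt (k : Int) : String :=
  let p := pvLoopB k 1 [] [] (by norm_num)
  -- large[::-1] is List.reverse (PySem.List.slice?_none_none_neg_one)
  let divisors := p.1 ++ p.2.reverse
  if divisors.sum == k && !divisors.isEmpty then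
    PySem.Int.toStr k ++ " = " ++ PySem.Str.join " + " (divisors.map PySem.Int.toStr)
  else
    PySem.Int.toStr k ++ " is NOT perfect."

-- ===== PRECONDITION & SPEC =====
-- Pre_ excludes only k = 0, where A raises IndexError (arr[-1] on the empty divisor list).
def Pre_perfectString (k : Int) : Prop := k ≠ 0
instance (k : Int) : Decidable (Pre_perfectString k) := by unfold Pre_perfectString; infer_instance
def pvWitness_perfectString : Int := (6)

def Spec_perfectString (k : Int) (out : String) : Prop := out = perfectString_alt k
instance (k : Int) (out : String) : Decidable (Spec_perfectString k out) := by unfold Spec_perfectString; infer_instance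

-- ===== CLAIM (what is proved, stated in full; the proofs are below) =====
def Claim_equal_perfectString : Prop := ∀ (k : Int), Dom_perfectString k → Pre_perfectString k → Spec_perfectString k (perfectString k)

-- ===== LEMMAS AND PROOFS =====

def pvSmalls (k i : Int) (hi : 1 ≤ i) : List Int :=
  if h : i * i ≤ k then
    (if PySem.Int.mod k i == 0 ∧ i ≠ k then [i] else []) ++ pvSmalls k (i + 1) (by omega)
  else []
termination_by (k + 1 - i).toNat
decreasing_by
  have hik : i ≤ k := le_trans (le_mul_of_one_le_left (by omega) hi) h
  omega
def pvLarges (k i : Int) (hi : 1 ≤ i) : List Int :=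
  if h : i * i ≤ k then
    (if PySem.Int.mod k i == 0 ∧ PySem.Int.floordiv k i ≠ i ∧ PySem.Int.floordiv k i ≠ k
      then [PySem.Int.floordiv k i] else []) ++ pvLarges k (i + 1) (by omega)
  else []
termination_by (k + 1 - i).toNat
decreasing_by
  have hik : i ≤ k := le_trans (le_mul_of_one_le_left (by omega) hi) h
  omega




theorem pvSmalls_pos (k i : Int) (hi : 1 ≤ i) (h : i * i ≤ k) :
    pvSmalls k i hi = (if PySem.Int.mod k i == 0 ∧ i ≠ k then [i] else []) ++ pvSmalls k (i + 1) (by omega) := by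
  rw [pvSmalls]; simp [h]

theorem pvSmalls_neg (k i : Int) (hi : 1 ≤ i) (h : ¬ i * i ≤ k) : pvSmalls k i hi = [] := by
  rw [pvSmalls]; simp [h]

theorem pvLarges_pos (k i : Int) (hi : 1 ≤ i) (h : i * i ≤ k) :
    pvLarges k i hi = (if PySem.Int.mod k i == 0 ∧ PySem.Int.floordiv k i ≠ i ∧ PySem.Int.floordiv k i ≠ k
      then [PySem.Int.floordiv k i] else []) ++ pvLarges k (i + 1) (by omega) := by
  rw [pvLarges]; simp [h]

theorem pvLarges_neg (k i : Int) (hi : 1 ≤ i) (h : ¬ i * i ≤ k) : pvLarges k i hi = [] := by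
  rw [pvLarges]; simp [h]

theorem pvLoopB_eq (k i : Int) (sm lg : List Int) (hi : 1 ≤ i) :
    pvLoopB k i sm lg hi = (sm ++ pvSmalls k i hi, lg ++ pvLarges k i hi) := by
  fun_induction pvLoopB k i sm lg hi with
  | case1 i sm lg hi hle hmod sm' j lg' ih =>
      rw [ih]
      conv_rhs => rw [pvSmalls_pos k i hi hle, pvLarges_pos k i hi hle]
      refine Prod.ext ?_ ?_
      · show sm' ++ _ = sm ++ _
        rw [← List.append_assoc]
        congr 1
        simp only [sm']
        by_cases hik : i = k <;> simp [hik, hmod]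
      · show lg' ++ _ = lg ++ _
        rw [← List.append_assoc]
        congr 1
        simp only [lg', j]
        by_cases hc : PySem.Int.floordiv k i ≠ i ∧ PySem.Int.floordiv k i ≠ k <;> simp [hc, hmod]
  | case2 i sm lg hi hle hmod ih =>
      rw [ih]
      conv_rhs => rw [pvSmalls_pos k i hi hle, pvLarges_pos k i hi hle]
      have hm : ¬ ((PySem.Int.mod k i == 0) = true) := by simp_all
      simp [hm]
  | case3 i sm lg hi hle =>
      rw [pvSmalls_neg k i hi hle, pvLarges_neg k i hi hle]
      simp

theorem pv_mem_smalls (k i d : Int) (hi : 1 ≤ i) :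
    d ∈ pvSmalls k i hi ↔ i ≤ d ∧ d * d ≤ k ∧ PySem.Int.mod k d = 0 ∧ d ≠ k := by
  fun_induction pvSmalls k i hi with
  | case1 i hi hle ih =>
      simp only [List.mem_append, ih]
      constructor
      · rintro (hmem | ⟨h1, h2, h3, h4⟩)
        · split at hmem
          · rename_i hc
            simp only [List.mem_singleton] at hmem
            subst hmem
            exact ⟨le_refl _, hle, by simpa using hc.1, hc.2⟩
          · simp at hmem
        · exact ⟨by omega, h2, h3, h4⟩
      · rintro ⟨h1, h2, h3, h4⟩
        by_cases hd : d = i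
        · subst hd
          left
          simp [h3, h4]
        · right
          exact ⟨by omega, h2, h3, h4⟩
  | case2 i hi hle =>
      simp only [List.not_mem_nil, false_iff]
      rintro ⟨h1, h2, h3, h4⟩
      exact hle (by nlinarith)

theorem pv_mem_larges (k i d : Int) (hi : 1 ≤ i) :
    d ∈ pvLarges k i hi ↔
      ∃ j, i ≤ j ∧ j * j ≤ k ∧ PySem.Int.mod k j = 0 ∧ PySem.Int.floordiv k j = d ∧ d ≠ j ∧ d ≠ k := by
  fun_induction pvLarges k i hi with
  | case1 i hi hle ih =>
      simp only [List.mem_append, ih]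
      constructor
      · rintro (hmem | ⟨j, h1, h2, h3, h4, h5, h6⟩)
        · split at hmem
          · rename_i hc
            simp only [List.mem_singleton] at hmem
            subst hmem
            exact ⟨i, le_refl _, hle, by simpa using hc.1, rfl, hc.2.1, hc.2.2⟩
          · simp at hmem
        · exact ⟨j, by omega, h2, h3, h4, h5, h6⟩
      · rintro ⟨j, h1, h2, h3, h4, h5, h6⟩
        by_cases hj : j = i
        · subst hj
          left
          subst h4
          simp [h3, h5, h6]
        · right
          exact ⟨j, by omega, h2, h3, h4, h5, h6⟩
  | case2 i hi hle =>
      simp only [List.not_mem_nil, false_iff]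
      rintro ⟨j, h1, h2, h3, h4, h5, h6⟩
      exact hle (by nlinarith)


theorem pv_mod0 (k d : Int) (hd : 0 < d) : PySem.Int.mod k d = 0 ↔ d ∣ k := by
  rw [PySem.Int.mod_eq_emod_of_pos hd]
  exact ⟨Int.dvd_of_emod_eq_zero, Int.emod_eq_zero_of_dvd⟩

theorem pv_div_lt (k i j : Int) (hi : 0 < i) (hij : i < j) (hik : i ∣ k) (hjk : j ∣ k) (hk : 0 < k) :
    k / j < k / i := by
  obtain ⟨d, hd⟩ := hik
  obtain ⟨e, he⟩ := hjk
  have hi' : i ≠ 0 := by omega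
  have hj' : j ≠ 0 := by omega
  have h1 : k / i = d := by rw [hd, Int.mul_ediv_cancel_left _ hi']
  have h2 : k / j = e := by rw [he, Int.mul_ediv_cancel_left _ hj']
  rw [h1, h2]
  have hd0 : 0 < d := by nlinarith
  by_contra hcon
  push Not at hcon
  nlinarith

theorem pv_pairwise_smalls (k i : Int) (hi : 1 ≤ i) : (pvSmalls k i hi).Pairwise (· < ·) := by
  fun_induction pvSmalls k i hi with
  | case1 i hi hle ih =>
      refine List.pairwise_append.mpr ⟨?_, ih, ?_⟩
      · split <;> simp
      · intro a ha b hb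
        have hb' := (pv_mem_smalls k (i + 1) b (by omega)).mp hb
        have ha' : a = i := by split at ha <;> simp_all
        omega
  | case2 i hi hle => simp

theorem pv_pairwise_larges (k i : Int) (hi : 1 ≤ i) : (pvLarges k i hi).Pairwise (· > ·) := by
  fun_induction pvLarges k i hi with
  | case1 i hi hle ih =>
      refine List.pairwise_append.mpr ⟨?_, ih, ?_⟩
      · split <;> simp
      · intro a ha b hb
        obtain ⟨j, hj1, hj2, hj3, hj4, hj5, hj6⟩ := (pv_mem_larges k (i + 1) b (by omega)).mp hb
        have hk : 0 < k := by nlinarith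
        have ha' : a = PySem.Int.floordiv k i ∧ PySem.Int.mod k i = 0 := by
          split at ha <;> simp_all
        have hj0 : 0 < j := by omega
        have hdi : i ∣ k := (pv_mod0 k i (by omega)).mp ha'.2
        have hdj : j ∣ k := (pv_mod0 k j hj0).mp hj3
        have := pv_div_lt k i j (by omega) (by omega) hdi hdj hk
        rw [PySem.Int.floordiv_eq_ediv_of_pos (by omega : (0:Int) < i)] at ha'
        rw [PySem.Int.floordiv_eq_ediv_of_pos hj0] at hj4
        simp only [gt_iff_lt]
        omega
  | case2 i hi hle => simp

-- every small divisor is below every large one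
theorem pv_small_lt_large (k s d : Int) (hs1 : 1 ≤ s) (hs2 : s * s ≤ k)
    (j : Int) (hj0 : 0 < j) (hj2 : j * j ≤ k) (hj3 : PySem.Int.mod k j = 0)
    (hj4 : PySem.Int.floordiv k j = d) (hj5 : d ≠ j) : s < d := by
  have hk : 0 < k := by nlinarith
  obtain ⟨e, he⟩ := (pv_mod0 k j hj0).mp hj3
  have hde : d = e := by
    rw [PySem.Int.floordiv_eq_ediv_of_pos hj0] at hj4
    rw [he, Int.mul_ediv_cancel_left _ (by omega : j ≠ 0)] at hj4
    omega
  subst hde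
  have hd0 : 0 < d := by nlinarith
  have hjd : j < d := by
    rcases lt_trichotomy j d with h | h | h
    · exact h
    · exact absurd h.symm hj5
    · nlinarith
  by_contra hc
  push Not at hc
  nlinarith

theorem pv_divisors_eq (k : Int) :
    pvSmalls k 1 (by norm_num) ++ (pvLarges k 1 (by norm_num)).reverse
      = (PySem.List.pyRange 1 k 1).filter (fun i => PySem.Int.mod k i == 0) := by
  have hmemL : ∀ d, d ∈ pvSmalls k 1 (by norm_num) ++ (pvLarges k 1 (by norm_num)).reverse ↔
      (1 ≤ d ∧ d < k ∧ PySem.Int.mod k d = 0) := by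
    intro d
    rw [List.mem_append, List.mem_reverse, pv_mem_smalls, pv_mem_larges]
    constructor
    · rintro (⟨h1, h2, h3, h4⟩ | ⟨j, hj1, hj2, hj3, hj4, hj5, hj6⟩)
      · have hk : 0 < k := by nlinarith
        have hdvd : d ∣ k := (pv_mod0 k d (by omega)).mp h3
        have := Int.le_of_dvd hk hdvd
        exact ⟨h1, by omega, h3⟩
      · have hk : 0 < k := by nlinarith
        obtain ⟨e, he⟩ := (pv_mod0 k j (by omega)).mp hj3
        have hde : d = e := by
          rw [PySem.Int.floordiv_eq_ediv_of_pos (by omega : (0:Int) < j)] at hj4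
          rw [he, Int.mul_ediv_cancel_left _ (by omega : j ≠ 0)] at hj4
          omega
        subst hde
        have hd0 : 0 < d := by nlinarith
        have hdvd : d ∣ k := ⟨j, by linarith [mul_comm j d]⟩
        have hle := Int.le_of_dvd hk hdvd
        exact ⟨by omega, by omega, (pv_mod0 k d hd0).mpr hdvd⟩
    · rintro ⟨h1, h2, h3⟩
      have hk : 1 < k := by omega
      have hdvd : d ∣ k := (pv_mod0 k d (by omega)).mp h3
      by_cases hsm : d * d ≤ k
      · exact Or.inl ⟨h1, hsm, h3, by omega⟩
      · right
        obtain ⟨j, hj⟩ := hdvd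
        have hj0 : 0 < j := by nlinarith
        have hjd : j < d := by nlinarith
        refine ⟨j, hj0, by nlinarith, (pv_mod0 k j hj0).mpr ⟨d, by linarith [mul_comm j d]⟩, ?_, by omega, by omega⟩
        rw [PySem.Int.floordiv_eq_ediv_of_pos hj0, hj, mul_comm d j, Int.mul_ediv_cancel_left _ (by omega : j ≠ 0)]
  have hpwL : (pvSmalls k 1 (by norm_num) ++ (pvLarges k 1 (by norm_num)).reverse).Pairwise (· < ·) := by
    refine List.pairwise_append.mpr ⟨pv_pairwise_smalls k 1 (by norm_num), ?_, ?_⟩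
    · rw [List.pairwise_reverse]
      exact pv_pairwise_larges k 1 (by norm_num)
    · intro a ha b hb
      rw [List.mem_reverse] at hb
      obtain ⟨h1, h2, h3, h4⟩ := (pv_mem_smalls k 1 a (by norm_num)).mp ha
      obtain ⟨j, hj1, hj2, hj3, hj4, hj5, hj6⟩ := (pv_mem_larges k 1 b (by norm_num)).mp hb
      exact pv_small_lt_large k a b h1 h2 j (by omega) hj2 hj3 hj4 hj5
  have hpwR : ((PySem.List.pyRange 1 k 1).filter (fun i => PySem.Int.mod k i == 0)).Pairwise (· < ·) :=
    (PySem.List.pairwise_lt_pyRange_one 1 k).sublist List.filter_sublist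
  have hmemR : ∀ d, d ∈ (PySem.List.pyRange 1 k 1).filter (fun i => PySem.Int.mod k i == 0) ↔
      (1 ≤ d ∧ d < k ∧ PySem.Int.mod k d = 0) := by
    intro d
    rw [List.mem_filter, PySem.List.mem_pyRange_one]
    simp [and_assoc]
  have hperm := (List.perm_ext_iff_of_nodup (hpwL.imp ne_of_lt) (hpwR.imp ne_of_lt)).mpr
      (fun a => by rw [hmemL, hmemR])
  exact List.Perm.eq_of_pairwise (fun a b _ _ h1 h2 => le_antisymm h1 h2)
      (hpwL.imp le_of_lt) (hpwR.imp le_of_lt) hperm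

theorem pv_join_singleton (sep s : String) : PySem.Str.join sep [s] = s := by
  apply String.toList_inj.mp
  simp [PySem.Str.toList_join, PySem.Chars.join_singleton]

theorem pv_join_cons₂ (sep a b : String) (l : List String) :
    PySem.Str.join sep (a :: b :: l) = a ++ sep ++ PySem.Str.join sep (b :: l) := by
  apply String.toList_inj.mp
  simp [PySem.Str.toList_join, PySem.Chars.join_cons_cons]

theorem pv_fmt_core (ys : List Int) (x : Int) (p : String) :
    (ys.foldl (fun t d => t ++ " " ++ PySem.Int.toStr d ++ " +") p) ++ " " ++ PySem.Int.toStr x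
      = p ++ " " ++ PySem.Str.join " + " ((ys ++ [x]).map PySem.Int.toStr) := by
  induction ys generalizing p with
  | nil => simp [pv_join_singleton]
  | cons y ys ih =>
      rw [List.foldl_cons, ih, List.cons_append, List.map_cons]
      have hne : ∃ b l, (ys ++ [x]).map PySem.Int.toStr = b :: l := by
        cases ys <;> exact ⟨_, _, rfl⟩
      obtain ⟨b, l, hbl⟩ := hne
      rw [hbl, pv_join_cons₂]
      rw [show (" + " : String) = " +" ++ " " from rfl]
      simp [String.append_assoc]

theorem pv_main (k : Int) (hk : k ≠ 0) : perfectString k = perfectString_alt k := by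
  unfold perfectString perfectString_alt
  rw [pvLoopB_eq]
  simp only [PySem.List.foldl_append_if_eq_filter, List.nil_append]
  rw [pv_divisors_eq k]
  rcases List.eq_nil_or_concat ((PySem.List.pyRange 1 k 1).filter (fun i => PySem.Int.mod k i == 0)) with hnil | ⟨ys, x, hys⟩
  · rw [hnil]
    have h0 : ((([] : List Int).sum) == k) = false := by
      rw [beq_eq_false_iff_ne]
      simpa using Ne.symm hk
    rw [h0]
    simp
  · rw [List.concat_eq_append] at hys
    rw [hys]
    by_cases hsum : (ys ++ [x]).sum = k
    · have hb : ((ys ++ [x]).sum == k) = true := by simp [hsum]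
      have hie : (ys ++ [x]).isEmpty = false := by simp
      rw [hb, hie]
      simp only [Bool.not_false, Bool.and_true, if_pos]
      have hlen : ((ys ++ [x]).length : Int) - 1 = (ys.length : Int) := by simp
      rw [hlen]
      have hcongr : ∀ (acc : String), ∀ i ∈ PySem.List.pyRange 0 (ys.length : Int) 1,
          acc ++ " " ++ PySem.Int.toStr (PySem.List.pyGetD (ys ++ [x]) i 0) ++ " +"
            = acc ++ " " ++ PySem.Int.toStr (PySem.List.pyGetD ys i 0) ++ " +" := by
        intro acc i hi
        rw [PySem.List.mem_pyRange_one] at hi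
        rw [PySem.List.pyGetD_of_nonneg _ _ hi.1, PySem.List.pyGetD_of_nonneg _ _ hi.1,
          List.getD_append _ _ _ _ (by omega)]
      have hstep :
          List.foldl (fun t i => t ++ " " ++ PySem.Int.toStr (PySem.List.pyGetD (ys ++ [x]) i 0) ++ " +")
            (PySem.Int.toStr k ++ " =") (PySem.List.pyRange 0 (ys.length : Int) 1)
          = List.foldl (fun t v => t ++ " " ++ PySem.Int.toStr v ++ " +") (PySem.Int.toStr k ++ " =") ys := by
        rw [PySem.List.foldl_congr_mem _ _
          (fun t i => t ++ " " ++ PySem.Int.toStr (PySem.List.pyGetD ys i 0) ++ " +") _ hcongr]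
        exact PySem.List.foldl_pyRange_zero_pyGetD' ys 0
          (fun t v => t ++ " " ++ PySem.Int.toStr v ++ " +") (PySem.Int.toStr k ++ " =")
      rw [hstep]
      have hlast : PySem.List.pyGetD (ys ++ [x]) (ys.length : Int) 0 = x := by
        rw [PySem.List.pyGetD_eq_getElem _ 0 (by positivity) (by simp)]
        simp
      rw [hlast, pv_fmt_core]
      rw [show (" = " : String) = " =" ++ " " from rfl]
      simp [String.append_assoc]
    · have hb : ((ys ++ [x]).sum == k) = false := by
        rw [beq_eq_false_iff_ne]
        exact hsum
      rw [hb]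
      simp

-- ===== VERDICT (by name: the statement is the Claim_ definition above) =====
theorem perfectString_spec : Claim_equal_perfectString := by
  intro k _ hpre
  show perfectString k = perfectString_alt k
  exact pv_main k hpre
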